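-- pv_equiv track=rewrite | github.com/ibado/aoc2025 | python/day6.py | part2
-- ===== SOURCE A (Python) =====
-- def op_ident(op: str) -> int:
--     assert op in ['*', '+']
--     return 1 if op == '*' else 0
--
-- def incr_by_op(val: int, op: str, amount: int) -> int:
--     assert op in ['*', '+']
--     if op == '*':
--         val *= amount
--     elif op == '+':
--         val += amount
--     return val
--
-- def part2(lines: list[str]) -> int:
--     operators = list(filter(str.strip, lines.pop().split(' ')))
--     rows = len(lines)
--     cols = len(lines[0]) - 1
--     op_idx = 0
--     result = 0
--     temp = op_ident(operators[op_idx])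
--     # transposed iteration
--     for j in range(cols):
--         num = ''
--         for i in range(rows):
--             num += lines[i][j]
--         if num.strip():
--             op = operators[op_idx]
--             n = int(num.strip())
--             temp = incr_by_op(temp, op, n)
--         else:
--             op_idx += 1
--             result += temp
--             temp = op_ident(operators[op_idx])
--     result += temp # there's no black line at the end
--     return result
-- ===== SOURCE B (Python) =====
-- def op_ident(op: str) -> int:
--     assert op in ['*', '+']
--     return 1 if op == '*' else 0
--
-- def incr_by_op(val: int, op: str, amount: int) -> int:
--     assert op in ['*', '+']
--     if op == '*':
--         val *= amount
--     elif op == '+':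
--         val += amount
--     return val
--
-- def split_groups(cols):
--     # partition the column strings at blank columns, KEEPING empty groups
--     if not cols:
--         return [[]]
--     rest = split_groups(cols[1:])
--     if cols[0].strip():
--         return [[cols[0]] + rest[0]] + rest[1:]
--     return [[]] + rest
--
-- def group_value(op, nums):
--     acc = op_ident(op)
--     for num in nums:
--         acc = incr_by_op(acc, op, int(num.strip()))
--     return acc
--
-- def part2(lines: list[str]) -> int:
--     operators = [t for t in lines.pop().split(' ') if t.strip()]
--     body = lines
--     columns = [''.join(row[j] for row in body) for j in range(len(body[0]) - 1)]
--     return sum(group_value(op, g) for op, g in zip(operators, split_groups(columns)))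
-- ===== Notes on version B (the rewrite author's own statement) =====
-- stated objective: alternative
-- what changed: A interleaves group bookkeeping (op_idx, result, temp) inside one stateful transposed scan; B first materialises the column strings, recursively partitions them at blank columns into groups (keeping empty groups), then zips the groups with the operators and sums each group's fold from the operator's identity.
import Mathlib
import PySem

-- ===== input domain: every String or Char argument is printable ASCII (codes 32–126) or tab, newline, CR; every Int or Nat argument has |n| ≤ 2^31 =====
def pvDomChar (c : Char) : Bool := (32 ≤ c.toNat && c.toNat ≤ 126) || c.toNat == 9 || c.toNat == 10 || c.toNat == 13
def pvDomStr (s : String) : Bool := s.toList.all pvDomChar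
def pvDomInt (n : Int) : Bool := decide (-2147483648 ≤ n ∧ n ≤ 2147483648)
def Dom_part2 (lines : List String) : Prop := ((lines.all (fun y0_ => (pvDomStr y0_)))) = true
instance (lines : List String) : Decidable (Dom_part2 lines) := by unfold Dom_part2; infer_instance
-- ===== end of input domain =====

-- B restructures A's single stateful transposed scan into: build column strings, split them into
-- groups at blank columns (keeping empty groups), zip groups with operators and sum the group folds.
-- Both Pythons pop the last element of `lines` (same in-place mutation); the claim is about the return value.
-- Strings are handled on List Char (PySem.Chars) per PYSEM guidance; asserts/raises are excluded by Pre_.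

-- ===== PORT A =====
-- shared helpers: op_ident / incr_by_op (their `assert op in ['*','+']` raises AssertionError on
-- other operators; those inputs are excluded by Pre_part2, so the ports omit the assert)
def opIdent (op : String) : Int := if op = "*" then 1 else 0

def incrByOp (val : Int) (op : String) (amount : Int) : Int :=
  if op = "*" then val * amount else if op = "+" then val + amount else val

def part2 (lines : List String) : Int :=
  match PySem.List.pop? lines with
  | none => 0  -- lines.pop() on an empty list: IndexError, excluded by Pre_part2
  | some (opsLine, body) =>
    let operators := ((PySem.Str.split? opsLine " ").getD []).filter (fun t => PySem.Str.strip t ≠ "")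
    let rows : Int := (body.length : Int)
    let cols : Int := PySem.Str.len (PySem.List.pyGetD body 0 "") - 1  -- body = [] (IndexError) excluded by Pre_
    let res := (PySem.List.pyRange 0 cols).foldl
      (fun (st : Int × Int × Int) j =>
        let num : List Char := (PySem.List.pyRange 0 rows).foldl
          (fun num i => num ++ [(PySem.Str.pyGet? (PySem.List.pyGetD body i "") j).getD ' ']) []
          -- short rows (IndexError) excluded by Pre_
        if PySem.Chars.strip num ≠ [] then
          let op := PySem.List.pyGetD operators st.1 ""
          let n := (PySem.Int.ofChars? (PySem.Chars.strip num)).getD 0  -- ValueError excluded by Pre_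
          (st.1, st.2.1, incrByOp st.2.2 op n)
        else
          (st.1 + 1, st.2.1 + st.2.2, opIdent (PySem.List.pyGetD operators (st.1 + 1) "")))
          -- operators[op_idx+1] out of range (IndexError) excluded by Pre_
      (0, 0, opIdent (PySem.List.pyGetD operators 0 ""))
    res.2.1 + res.2.2

-- ===== PORT B =====
def splitGroups (colsL : List (List Char)) : List (List (List Char)) :=
  match colsL with
  | [] => [[]]
  | c :: rest =>
    let r := splitGroups rest
    if PySem.Chars.strip c ≠ [] then (c :: r.headD []) :: r.tail
    else [] :: r

def groupValue (op : String) (nums : List (List Char)) : Int :=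
  nums.foldl (fun acc num => incrByOp acc op ((PySem.Int.ofChars? (PySem.Chars.strip num)).getD 0))
    (opIdent op)

def part2_alt (lines : List String) : Int :=
  match PySem.List.pop? lines with
  | none => 0  -- lines.pop() on an empty list: IndexError, excluded by Pre_part2
  | some (opsLine, body) =>
    let operators := ((PySem.Str.split? opsLine " ").getD []).filter (fun t => PySem.Str.strip t ≠ "")
    let columns := (PySem.List.pyRange 0 (PySem.Str.len (PySem.List.pyGetD body 0 "") - 1)).map
      (fun j => body.map (fun row => (PySem.Str.pyGet? row j).getD ' '))
    (operators.zip (splitGroups columns)).foldl (fun s p => s + groupValue p.1 p.2) 0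

-- ===== PRECONDITION & SPEC =====
-- helpers for Pre_: the operator tokens, the column character lists and the number of blank columns
def pvOps (lines : List String) : List String :=
  ((PySem.Str.split? (lines.getLast?.getD "") " ").getD []).filter (fun t => PySem.Str.strip t ≠ "")

def pvColumns (lines : List String) : List (List Char) :=
  (PySem.List.pyRange 0 (PySem.Str.len (PySem.List.pyGetD lines.dropLast 0 "") - 1)).map
    (fun j => lines.dropLast.map (fun row => (PySem.Str.pyGet? row j).getD ' '))

def pvBlanks (lines : List String) : Nat :=
  (pvColumns lines).countP (fun c => PySem.Chars.strip c = [])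

-- Pre_ holds exactly where the Python A returns: it excludes only inputs on which A raises
-- (pop on an empty list, the first-line lookup on a one-element list, a row shorter than the scanned width, more blank
-- columns than spare operators, an operator other than '*'/'+' among the used ones, a non-blank
-- column that is not a Python int literal).
def Pre_part2 (lines : List String) : Prop :=
  lines ≠ [] ∧
  lines.dropLast ≠ [] ∧
  (∀ row ∈ lines.dropLast,
    PySem.Str.len (PySem.List.pyGetD lines.dropLast 0 "") - 1 ≤ PySem.Str.len row) ∧
  pvBlanks lines < (pvOps lines).length ∧
  (∀ op ∈ (pvOps lines).take (pvBlanks lines + 1), op = "*" ∨ op = "+") ∧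
  (∀ c ∈ pvColumns lines, PySem.Chars.strip c ≠ [] →
    (PySem.Int.ofChars? (PySem.Chars.strip c)).isSome)

instance (lines : List String) : Decidable (Pre_part2 lines) := by
  unfold Pre_part2; infer_instance

def pvWitness_part2 : List String := ["1 2", "3 4", "+ *"]

def Spec_part2 (lines : List String) (out : Int) : Prop := out = part2_alt lines
instance (lines : List String) (out : Int) : Decidable (Spec_part2 lines out) := by
  unfold Spec_part2; infer_instance

-- ===== CLAIM (what is proved, stated in full; the proofs are below) =====
def Claim_equal_part2 : Prop :=
  ∀ (lines : List String), Dom_part2 lines → Pre_part2 lines → Spec_part2 lines (part2 lines)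

-- ===== LEMMAS AND PROOFS =====

theorem splitGroups_ne_nil (l : List (List Char)) : splitGroups l ≠ [] := by
  cases l with
  | nil => simp [splitGroups]
  | cons c rest =>
    simp only [splitGroups]
    split <;> simp

theorem foldl_add_map {α : Type} (f : α → Int) (l : List α) (s : Int) :
    l.foldl (fun s p => s + f p) s = s + (l.map f).sum := by
  induction l generalizing s with
  | nil => simp
  | cons x xs ih => simp [List.foldl_cons, ih (s + f x)]; ring

-- groupValue starting from an arbitrary accumulator (A's running temp)
def groupValue' (op : String) (acc : Int) (nums : List (List Char)) : Int :=
  nums.foldl (fun a num => incrByOp a op ((PySem.Int.ofChars? (PySem.Chars.strip num)).getD 0)) acc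

-- A's loop step, phrased on the column character list (what the step computes after the inner
-- row loop has been rewritten to the column itself)
def stepA (ops : List String) (st : Int × Int × Int) (c : List Char) : Int × Int × Int :=
  if PySem.Chars.strip c ≠ [] then
    (st.1, st.2.1, incrByOp st.2.2 (PySem.List.pyGetD ops st.1 "")
      ((PySem.Int.ofChars? (PySem.Chars.strip c)).getD 0))
  else
    (st.1 + 1, st.2.1 + st.2.2, opIdent (PySem.List.pyGetD ops (st.1 + 1) ""))

theorem loopA_eq (ops : List String) (colsL : List (List Char)) :
    ∀ (k : Nat) (result temp : Int),
    k + colsL.countP (fun c => decide (PySem.Chars.strip c = [])) < ops.length →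
    (colsL.foldl (stepA ops) ((k : Int), result, temp)).2.1
      + (colsL.foldl (stepA ops) ((k : Int), result, temp)).2.2
    = result
      + groupValue' (ops.getD k "") temp ((splitGroups colsL).headD [])
      + (((ops.drop (k + 1)).zip ((splitGroups colsL).tail)).map
          (fun p => groupValue p.1 p.2)).sum := by
  induction colsL with
  | nil =>
    intro k result temp hk
    simp [splitGroups, groupValue']
  | cons c rest ih =>
    intro k result temp hk
    obtain ⟨g0, gs, hr⟩ : ∃ g0 gs, splitGroups rest = g0 :: gs := by
      cases h : splitGroups rest with
      | nil => exact absurd h (splitGroups_ne_nil rest)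
      | cons a b => exact ⟨a, b, rfl⟩
    by_cases hb : PySem.Chars.strip c = []
    · -- blank column: close the current group, open the next one
      have hcount : (c :: rest).countP (fun c => decide (PySem.Chars.strip c = []))
          = rest.countP (fun c => decide (PySem.Chars.strip c = [])) + 1 := by
        simp [hb]
      have hk' : (k + 1) + rest.countP (fun c => decide (PySem.Chars.strip c = [])) < ops.length := by
        rw [hcount] at hk; omega
      have hlt : k + 1 < ops.length := by omega
      have hstep : stepA ops ((k : Int), result, temp) c
          = (((k + 1 : Nat) : Int), result + temp,
             opIdent (PySem.List.pyGetD ops ((k + 1 : Nat) : Int) "")) := by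
        rw [Nat.cast_add_one]
        simp [stepA, hb]
      have hdrop : ops.drop (k + 1) = ops[k + 1] :: ops.drop (k + 2) :=
        List.drop_eq_getElem_cons hlt
      have hgetD : ops.getD (k + 1) "" = ops[k + 1] := List.getD_eq_getElem ops "" hlt
      calc (((c :: rest).foldl (stepA ops) ((k : Int), result, temp)).2.1
            + ((c :: rest).foldl (stepA ops) ((k : Int), result, temp)).2.2)
          = ((rest.foldl (stepA ops) (((k + 1 : Nat) : Int), result + temp,
              opIdent (PySem.List.pyGetD ops ((k + 1 : Nat) : Int) ""))).2.1
            + (rest.foldl (stepA ops) (((k + 1 : Nat) : Int), result + temp,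
              opIdent (PySem.List.pyGetD ops ((k + 1 : Nat) : Int) ""))).2.2) := by
            rw [List.foldl_cons, hstep]
        _ = (result + temp)
            + groupValue' (ops.getD (k + 1) "") (opIdent (PySem.List.pyGetD ops ((k + 1 : Nat) : Int) ""))
                ((splitGroups rest).headD [])
            + (((ops.drop (k + 2)).zip ((splitGroups rest).tail)).map
                (fun p => groupValue p.1 p.2)).sum := ih (k + 1) (result + temp) _ hk'
        _ = result
            + groupValue' (ops.getD k "") temp ((splitGroups (c :: rest)).headD [])
            + (((ops.drop (k + 1)).zip ((splitGroups (c :: rest)).tail)).map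
                (fun p => groupValue p.1 p.2)).sum := by
            have hsg : splitGroups (c :: rest) = [] :: splitGroups rest := by
              simp [splitGroups, hb]
            rw [hsg, hr, hdrop]
            simp only [List.headD_cons, List.tail_cons, List.zip_cons_cons, List.map_cons,
              List.sum_cons, groupValue', groupValue, List.foldl_nil,
              PySem.List.pyGetD_natCast, hgetD]
            ring
    · -- non-blank column: fold it into the current group's accumulator
      have hcount : (c :: rest).countP (fun c => decide (PySem.Chars.strip c = []))
          = rest.countP (fun c => decide (PySem.Chars.strip c = [])) := by
        simp [hb]
      have hk' : k + rest.countP (fun c => decide (PySem.Chars.strip c = [])) < ops.length := by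
        rw [hcount] at hk; omega
      have hstep : stepA ops ((k : Int), result, temp) c
          = ((k : Int), result,
             incrByOp temp (PySem.List.pyGetD ops (k : Int) "")
               ((PySem.Int.ofChars? (PySem.Chars.strip c)).getD 0)) := by
        simp [stepA, hb]
      have hsg : splitGroups (c :: rest) = (c :: (splitGroups rest).headD []) :: (splitGroups rest).tail := by
        simp [splitGroups, hb]
      rw [List.foldl_cons, hstep,
        ih k result (incrByOp temp (PySem.List.pyGetD ops (k : Int) "")
          ((PySem.Int.ofChars? (PySem.Chars.strip c)).getD 0)) hk', hsg]
      simp [groupValue', PySem.List.pyGetD_natCast]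

-- the operator list, the column at index j, and the column list, after lines = body ++ [last]
def opsOf (last : String) : List String :=
  ((PySem.Str.split? last " ").getD []).filter (fun t => PySem.Str.strip t ≠ "")

def colsOf (body : List String) : List (List Char) :=
  (PySem.List.pyRange 0 (PySem.Str.len (PySem.List.pyGetD body 0 "") - 1)).map
    (fun j => body.map (fun row => (PySem.Str.pyGet? row j).getD ' '))

theorem map_pyGetD_range_comp {α β : Type} (xs : List α) (d : α) (g : α → β) :
    (PySem.List.pyRange 0 (xs.length : Int)).map (fun i => g (PySem.List.pyGetD xs i d))
      = xs.map g := by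
  rw [show (fun i => g (PySem.List.pyGetD xs i d))
        = g ∘ (fun i => PySem.List.pyGetD xs i d) from rfl,
    ← List.map_map, PySem.List.map_pyGetD_pyRange_zero']

theorem inner_col (body : List String) (j : Int) :
    (PySem.List.pyRange 0 (body.length : Int)).map
      (fun x => (PySem.Str.pyGet? (PySem.List.pyGetD body x "") j).getD ' ')
      = body.map (fun row => (PySem.Str.pyGet? row j).getD ' ') :=
  map_pyGetD_range_comp body "" (fun row => (PySem.Str.pyGet? row j).getD ' ')

theorem portA_closed (body : List String) (last : String) :
    part2 (body ++ [last])
      = ((colsOf body).foldl (stepA (opsOf last))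
          (0, 0, opIdent (PySem.List.pyGetD (opsOf last) 0 ""))).2.1
        + ((colsOf body).foldl (stepA (opsOf last))
          (0, 0, opIdent (PySem.List.pyGetD (opsOf last) 0 ""))).2.2 := by
  simp only [part2, PySem.List.pop?_last,
    PySem.List.foldl_append_singleton_eq_map, List.nil_append, inner_col,
    colsOf, opsOf, stepA, List.foldl_map]

theorem portB_closed (body : List String) (last : String) :
    part2_alt (body ++ [last])
      = (((opsOf last).zip (splitGroups (colsOf body))).map (fun p => groupValue p.1 p.2)).sum := by
  simp only [part2_alt, PySem.List.pop?_last]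
  rw [foldl_add_map (fun p : String × List (List Char) => groupValue p.1 p.2)]
  simp only [zero_add, colsOf, opsOf]

theorem ports_eq (body : List String) (last : String)
    (hblanks : pvBlanks (body ++ [last]) < (pvOps (body ++ [last])).length) :
    part2 (body ++ [last]) = part2_alt (body ++ [last]) := by
  simp only [pvBlanks, pvColumns, pvOps, List.dropLast_concat, List.getLast?_concat,
    Option.getD_some] at hblanks
  have hb2 : (colsOf body).countP (fun c => decide (PySem.Chars.strip c = []))
      < (opsOf last).length := hblanks
  have h0 : 0 < (opsOf last).length := by omega
  obtain ⟨g0, gs, hsg⟩ : ∃ g0 gs, splitGroups (colsOf body) = g0 :: gs := by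
    cases h : splitGroups (colsOf body) with
    | nil => exact absurd h (splitGroups_ne_nil _)
    | cons a b => exact ⟨a, b, rfl⟩
  have hget0 : (opsOf last).getD 0 "" = (opsOf last)[0] := List.getD_eq_getElem _ "" h0
  have hdrop0 : opsOf last = (opsOf last)[0] :: (opsOf last).tail := by
    have h := List.drop_eq_getElem_cons (i := 0) (l := opsOf last) h0
    simpa using h
  have hA := loopA_eq (opsOf last) (colsOf body) 0 0
    (opIdent (PySem.List.pyGetD (opsOf last) ((0 : Nat) : Int) "")) (by omega)
  rw [portA_closed, portB_closed]
  rw [show ((0 : Nat) : Int) = (0 : Int) from rfl] at hA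
  rw [hA, hsg]
  conv_rhs => rw [hdrop0]
  simp only [List.headD_cons, List.tail_cons, List.zip_cons_cons, List.map_cons, List.sum_cons,
    groupValue', groupValue, PySem.List.pyGetD_zero, zero_add, List.drop_one, hget0]

-- ===== VERDICT (by name: the statement is the Claim_ definition above) =====
theorem part2_spec : Claim_equal_part2 := by
  intro lines _ hpre
  rcases List.eq_nil_or_concat lines with rfl | ⟨body, last, rfl⟩
  · exact absurd rfl hpre.1
  · obtain ⟨-, hbody, -, hblanks, -, -⟩ := hpre
    unfold Spec_part2
    simp only [List.concat_eq_append] at hblanks ⊢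
    exact ports_eq body last hblanks
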